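-- pv_equiv track=rewrite | github.com/SlavkoPrytula/Algorithms-Mansion | CodeForces/program_candies.py | solve
-- ===== SOURCE A (Python) =====
-- def solve(weights):
--     a = []
--     b = []
--     weights = sorted(weights, key=lambda x: x)[::-1]
--     while 1:
--         if len(weights) == 0:
--             break
--         a.append(weights.pop(0))
--         while sum(b) != sum(a):
--             if len(weights) == 0:
--                 break
--             b.append(weights.pop(0))
--
--     return "YES" if sum(a) == sum(b) else "NO"
-- ===== SOURCE B (Python) =====
-- def solve(weights):
--     # Prefix-sum + hash-index formulation: sort descending, precompute prefix sums
--     # and a dict mapping each prefix value to its (ascending) positions; the greedy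
--     # block boundary "smallest j >= i+1 with prefix[j] == prefix[i] + 2*ws[i]" is
--     # then found by a dict lookup and a binary search instead of an inner scan.
--     ws = sorted(weights, reverse=True)
--     n = len(ws)
--     prefix = [0]
--     for w in ws:
--         prefix.append(prefix[-1] + w)
--     pos = {}
--     for j, v in enumerate(prefix):
--         pos.setdefault(v, []).append(j)
--     i = 0
--     while i < n:
--         lst = pos.get(prefix[i] + 2 * ws[i])
--         if lst is None:
--             return "NO"
--         lo, hi = 0, len(lst)
--         while lo < hi:
--             mid = (lo + hi) // 2
--             if lst[mid] < i + 1: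
--                 lo = mid + 1
--             else:
--                 hi = mid
--         if lo == len(lst):
--             return "NO"
--         i = lst[lo]
--     return "YES"
-- ===== Notes on version B (the rewrite author's own statement) =====
-- stated objective: faster
-- what changed: Replaces A's pop(0)/repeated-sum() greedy simulation by a prefix-sum formulation: after sorting descending it precomputes prefix sums and a dict from prefix value to its positions, and finds each greedy block boundary (smallest j>=i+1 with prefix[j]=prefix[i]+2*ws[i]) by a dict lookup plus binary search, with early NO when no boundary exists.
import Mathlib
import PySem

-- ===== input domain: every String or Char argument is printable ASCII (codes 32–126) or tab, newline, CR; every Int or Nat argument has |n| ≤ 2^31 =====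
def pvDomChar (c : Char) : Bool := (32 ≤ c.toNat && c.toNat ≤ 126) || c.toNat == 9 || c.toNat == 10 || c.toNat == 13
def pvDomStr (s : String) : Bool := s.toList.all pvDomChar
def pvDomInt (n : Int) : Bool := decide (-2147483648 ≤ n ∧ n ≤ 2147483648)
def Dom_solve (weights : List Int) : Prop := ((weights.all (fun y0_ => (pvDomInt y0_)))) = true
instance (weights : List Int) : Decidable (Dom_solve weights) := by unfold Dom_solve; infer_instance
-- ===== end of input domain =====

-- B replaces A's pop(0)/repeated-sum() greedy simulation by a prefix-sum formulation:
-- a dict from prefix value to positions plus a binary search find each greedy block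
-- boundary, with early NO (objective: faster, measured in a timing run).

-- ===== PORT A =====
-- inner while loop: while sum(b) != sum(a): if no weights left break; b.append(weights.pop(0))
-- returns (new b, remaining weights)
def pvInnerA (a b ws : List Int) : List Int × List Int :=
  if b.sum ≠ a.sum then
    match ws with
    | [] => (b, [])
    | x :: r => pvInnerA a (b ++ [x]) r
  else (b, ws)
termination_by ws.length
decreasing_by simp

-- termination fact the outer loop's recursion cites
theorem pvInnerA_len (a b ws : List Int) : (pvInnerA a b ws).2.length ≤ ws.length := by
  induction ws generalizing b with
  | nil => unfold pvInnerA; split <;> simp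
  | cons x r ih =>
    unfold pvInnerA
    split
    · exact le_trans (ih (b ++ [x])) (by simp)
    · simp

-- outer while loop: while 1: if no weights left break; a.append(weights.pop(0)); inner loop
def pvOuterA (a b ws : List Int) : List Int × List Int :=
  match ws with
  | [] => (a, b)
  | x :: r =>
    let p := pvInnerA (a ++ [x]) b r
    pvOuterA (a ++ [x]) p.1 p.2
termination_by ws.length
decreasing_by
  exact Nat.lt_succ_of_le (pvInnerA_len (a ++ [x]) b r)

def solve (weights : List Int) : String :=
  -- weights = sorted(weights, key=lambda x: x)[::-1]
  let ws := (PySem.List.slice? (PySem.List.sorted weights (fun x => x)) none none (-1)).getD []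
  let p := pvOuterA [] [] ws
  if p.1.sum = p.2.sum then "YES" else "NO"

-- ===== PORT B =====
-- loop body of: for w in ws: prefix.append(prefix[-1] + w)
def pvPrefixStep (ps : List Int) (w : Int) : List Int :=
  ps ++ [(PySem.List.pyGet? ps (-1)).getD 0 + w]

-- hand-written binary search of Source B: while lo < hi: mid = (lo+hi)//2; …
def pvBisect (lst : List Int) (x : Int) (lo hi : Int) : Int :=
  if h : lo < hi then
    let mid := PySem.Int.floordiv (lo + hi) 2
    if (PySem.List.pyGet? lst mid).getD 0 < x then pvBisect lst x (mid + 1) hi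
    else pvBisect lst x lo mid
  else lo
termination_by (hi - lo).toNat
decreasing_by
  · have hb := PySem.Int.floordiv_two_mid_bounds (le_of_lt h)
    omega
  · have hlt : PySem.Int.floordiv (lo + hi) 2 < hi := by
      rw [PySem.Int.floordiv_lt_iff_lt_mul (by omega)]
      omega
    have hb := PySem.Int.floordiv_two_mid_bounds (le_of_lt h)
    omega

-- the main while loop of Source B (fuel only makes the recursion structural; the
-- equivalence proof below instantiates it with enough fuel)
def pvMainLoop (ws pref : List Int) (pos : PySem.Dict Int (List Int)) (n : Int) :
    Nat → Int → String
  | 0, _ => "NO"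
  | fuel + 1, i =>
    if i < n then
      match pos.get? ((PySem.List.pyGet? pref i).getD 0 + 2 * (PySem.List.pyGet? ws i).getD 0) with
      | none => "NO"
      | some lst =>
        let lo := pvBisect lst (i + 1) 0 lst.length
        if lo = lst.length then "NO"
        else pvMainLoop ws pref pos n fuel ((PySem.List.pyGet? lst lo).getD 0)
    else "YES"

def solve_alt (weights : List Int) : String :=
  let ws := PySem.List.sorted weights (fun x => x) true
  let pref := ws.foldl pvPrefixStep [0]
  let pos := (PySem.List.enumerate pref).foldl
    (fun d p => d.modify p.2 [] (· ++ [p.1])) PySem.Dict.empty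
  pvMainLoop ws pref pos (ws.length : Int) (ws.length + 1) 0

-- ===== PRECONDITION & SPEC =====
def Spec_solve (weights : List Int) (out : String) : Prop := out = solve_alt weights
instance (weights : List Int) (out : String) : Decidable (Spec_solve weights out) := by unfold Spec_solve; infer_instance

-- ===== CLAIM (what is proved, stated in full; the proofs are below) =====
def Claim_equal_solve : Prop := ∀ (weights : List Int), Dom_solve weights → Spec_solve weights (solve weights)

-- ===== LEMMAS AND PROOFS =====

-- Python's sorted(xs, reverse=True) on ints equals the reverse of the ascending sort
theorem sorted_id_rev_eq_reverse (xs : List Int) :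
    PySem.List.sorted xs (fun x => x) true = (PySem.List.sorted xs (fun x => x)).reverse := by
  apply List.Perm.eq_of_pairwise (le := fun a b : Int => b ≤ a)
  · exact fun a b _ _ h1 h2 => le_antisymm h2 h1
  · exact PySem.List.sorted_pairwise_rev xs (fun x => x)
  · exact (List.pairwise_reverse).mpr (PySem.List.sorted_pairwise xs (fun x => x))
  · exact ((PySem.List.sorted_perm xs (fun x => x) true).trans
      ((PySem.List.sorted_perm xs (fun x => x) false).symm)).trans
      (List.reverse_perm _).symm

-- abstract greedy step on the pair of side sums (proof-side model of A's loop)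
def pvStep (s : Int × Int) (x : Int) : Int × Int :=
  if s.1 = s.2 then (s.1 + x, s.2) else (s.1, s.2 + x)

-- the inner loop consumes elements exactly while the foldl of pvStep would route them to b
theorem pvInnerA_spec (ws a b : List Int) :
    List.foldl pvStep (a.sum, b.sum) ws
      = List.foldl pvStep (a.sum, (pvInnerA a b ws).1.sum) (pvInnerA a b ws).2
    ∧ ((pvInnerA a b ws).2 = [] ∨ (pvInnerA a b ws).1.sum = a.sum) := by
  induction ws generalizing b with
  | nil =>
    unfold pvInnerA
    split <;> simp_all
  | cons x r ih =>
    unfold pvInnerA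
    split
    · rename_i hne
      have hstep : pvStep (a.sum, b.sum) x = (a.sum, b.sum + x) := by
        unfold pvStep
        simp only
        rw [if_neg (fun h => hne (by omega))]
      refine ⟨?_, (ih (b ++ [x])).2⟩
      have := (ih (b ++ [x])).1
      simp only [List.foldl_cons, hstep]
      simpa using this
    · rename_i heq
      push_neg at heq
      exact ⟨rfl, Or.inr heq⟩

-- the full A-loop computes the same pair of sums as the single foldl of pvStep
theorem pvOuterA_spec : ∀ (n : Nat) (ws a b : List Int), ws.length ≤ n → b.sum = a.sum →
    ((pvOuterA a b ws).1.sum, (pvOuterA a b ws).2.sum) = List.foldl pvStep (a.sum, b.sum) ws := by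
  intro n
  induction n with
  | zero =>
    intro ws a b hlen heq
    have : ws = [] := List.eq_nil_of_length_eq_zero (Nat.le_zero.mp hlen)
    subst this
    unfold pvOuterA; simp
  | succ n ih =>
    intro ws a b hlen heq
    match ws with
    | [] => unfold pvOuterA; simp
    | x :: r =>
      unfold pvOuterA
      simp only
      have hstep : pvStep (a.sum, b.sum) x = (a.sum + x, b.sum) := by
        unfold pvStep; simp [heq]
      have hsum : (a ++ [x]).sum = a.sum + x := by simp
      have hin := pvInnerA_spec r (a ++ [x]) b
      have hlen2 : (pvInnerA (a ++ [x]) b r).2.length ≤ n := by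
        have := pvInnerA_len (a ++ [x]) b r
        simp at hlen
        omega
      rcases hin.2 with hnil | hbeq
      · rw [hnil]
        unfold pvOuterA
        simp only [List.foldl_cons, hstep]
        have := hin.1
        rw [hnil] at this
        simp only [List.foldl_nil] at this
        rw [← hsum, this]
      · have := ih (pvInnerA (a ++ [x]) b r).2 (a ++ [x]) (pvInnerA (a ++ [x]) b r).1 hlen2
          (by rw [hbeq])
        rw [this]
        simp only [List.foldl_cons, hstep]
        rw [← hsum, hin.1]

-- greedy "debt" recursion: blocks of the descending list (proof-side model of both loops)
def pvEat (t : Int) : List Int → Bool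
  | [] => t == 0
  | y :: r => if t == 0 then pvEat y r else pvEat (t - y) r

-- the pair fold ends balanced iff the debt recursion succeeds
theorem pvStep_eat (ws : List Int) : ∀ (sa sb : Int),
    (decide ((List.foldl pvStep (sa, sb) ws).1 = (List.foldl pvStep (sa, sb) ws).2))
      = pvEat (sa - sb) ws := by
  induction ws with
  | nil =>
    intro sa sb
    simp only [List.foldl_nil, pvEat]
    rw [Bool.eq_iff_iff]
    simp [sub_eq_zero]
  | cons y r ih =>
    intro sa sb
    by_cases h : sa = sb
    · simp only [List.foldl_cons, pvStep, h, if_pos rfl, pvEat]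
      rw [ih]
      simp
    · simp only [List.foldl_cons, pvStep, if_neg h, pvEat]
      rw [if_neg (by simpa using sub_ne_zero_of_ne h), ih]
      congr 1; ring

-- index (number of consumed elements) at which the debt first returns to zero
def pvFirstK (t : Int) : List Int → Option Nat
  | [] => if t = 0 then some 0 else none
  | y :: r => if t = 0 then some 0 else (pvFirstK (t - y) r).map (· + 1)

theorem pvEat_firstK (zs : List Int) : ∀ t,
    pvEat t zs = match pvFirstK t zs with
      | none => false
      | some k => pvEat 0 (zs.drop k) := by
  induction zs with
  | nil =>
    intro t
    by_cases h : t = 0 <;> simp [pvEat, pvFirstK, h]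
  | cons y r ih =>
    intro t
    by_cases h : t = 0
    · simp [pvFirstK, h]
    · rw [pvFirstK]
      simp only [if_neg h]
      rw [pvEat]
      rw [if_neg (by simpa using h), ih (t - y)]
      cases pvFirstK (t - y) r <;> simp

theorem pvFirstK_some (zs : List Int) : ∀ t k, pvFirstK t zs = some k →
    k ≤ zs.length ∧ (zs.take k).sum = t ∧ ∀ k' < k, (zs.take k').sum ≠ t := by
  induction zs with
  | nil =>
    intro t k h
    rw [pvFirstK] at h
    by_cases ht : t = 0
    · rw [if_pos ht] at h
      injection h with h
      subst h
      exact ⟨Nat.zero_le _, by simp [ht], fun k' hk' => absurd hk' (Nat.not_lt_zero _)⟩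
    · rw [if_neg ht] at h
      simp at h
  | cons y r ih =>
    intro t k h
    rw [pvFirstK] at h
    by_cases ht : t = 0
    · rw [if_pos ht] at h
      injection h with h
      subst h
      exact ⟨Nat.zero_le _, by simp [ht], fun k' hk' => absurd hk' (Nat.not_lt_zero _)⟩
    · rw [if_neg ht] at h
      cases hk : pvFirstK (t - y) r with
      | none => rw [hk] at h; simp at h
      | some k0 =>
        rw [hk] at h; simp at h
        obtain ⟨h1, h2, h3⟩ := ih (t - y) k0 hk
        subst h
        refine ⟨by simpa using Nat.succ_le_succ h1, by simp [h2], ?_⟩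
        intro k' hk'
        cases k' with
        | zero => simpa using Ne.symm ht
        | succ k'' =>
          have := h3 k'' (by omega)
          simp; omega

theorem pvFirstK_none (zs : List Int) : ∀ t, pvFirstK t zs = none →
    ∀ k ≤ zs.length, (zs.take k).sum ≠ t := by
  induction zs with
  | nil =>
    intro t h k hk
    rw [pvFirstK] at h
    by_cases ht : t = 0
    · rw [if_pos ht] at h
      simp at h
    · simpa using Ne.symm ht
  | cons y r ih =>
    intro t h k hk
    rw [pvFirstK] at h
    by_cases ht : t = 0
    · simp [ht] at h
    · simp only [if_neg ht] at h
      cases hk0 : pvFirstK (t - y) r with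
      | some k0 => rw [hk0] at h; simp at h
      | none =>
        cases k with
        | zero => simpa using Ne.symm ht
        | succ k' =>
          have := ih (t - y) hk0 k' (by simpa using hk)
          simp
          omega

-- running prefix sums (proof-side model of the prefix list)
def pvSums (s : Int) : List Int → List Int
  | [] => []
  | w :: r => (s + w) :: pvSums (s + w) r

theorem pvPrefix_eq (ws : List Int) : ∀ (ps : List Int) (s : Int),
    ps.getLast? = some s → ws.foldl pvPrefixStep ps = ps ++ pvSums s ws := by
  induction ws with
  | nil => intro ps s _; simp [pvSums]
  | cons w r ih =>
    intro ps s hlast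
    have hstep : pvPrefixStep ps w = ps ++ [s + w] := by
      unfold pvPrefixStep
      have hne : ps ≠ [] := by intro h; subst h; simp at hlast
      rw [PySem.List.pyGet?_neg_one, hlast]
      simp
    rw [List.foldl_cons, hstep, ih (ps ++ [s + w]) (s + w) (by simp)]
    simp [pvSums]

theorem pvSums_length (ws : List Int) : ∀ s, (pvSums s ws).length = ws.length := by
  induction ws with
  | nil => intro s; simp [pvSums]
  | cons w r ih => intro s; simp [pvSums, ih]

theorem pvSums_getElem (ws : List Int) : ∀ (s : Int) (k : Nat) (h : k < ws.length),
    (pvSums s ws)[k]'(by rw [pvSums_length]; exact h) = s + (ws.take (k + 1)).sum := by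
  induction ws with
  | nil => intro s k h; simp at h
  | cons w r ih =>
    intro s k h
    cases k with
    | zero => simp [pvSums]
    | succ k' =>
      have := ih (s + w) k' (by simpa using h)
      simp only [pvSums, List.getElem_cons_succ, List.take_succ_cons, List.sum_cons]
      rw [this]
      ring

-- the prefix list built by B's loop, in closed form
theorem pvPref_eq (ws : List Int) : ws.foldl pvPrefixStep [0] = 0 :: pvSums 0 ws := by
  simpa using pvPrefix_eq ws [0] 0 (by simp)

theorem pvPref_length (ws : List Int) : (0 :: pvSums 0 ws).length = ws.length + 1 := by
  simp [pvSums_length]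

theorem pvPref_getElem (ws : List Int) (j : Nat) (hj : j ≤ ws.length) :
    (0 :: pvSums 0 ws)[j]'(by rw [pvPref_length]; omega) = (ws.take j).sum := by
  cases j with
  | zero => simp
  | succ j' =>
    have hlt : j' < ws.length := by omega
    simp only [List.getElem_cons_succ]
    rw [List.getElem_of_eq rfl (by rw [pvSums_length]; exact hlt)]
    rw [pvSums_getElem ws 0 j' hlt]
    simp

theorem pvPref_get (ws : List Int) (k : Nat) (hk : k ≤ ws.length) :
    PySem.List.pyGet? (0 :: pvSums 0 ws) (k : Int) = some ((ws.take k).sum) := by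
  rw [PySem.List.pyGet?_natCast,
    List.getElem?_eq_getElem (by rw [pvPref_length]; omega), pvPref_getElem ws k hk]

-- segment sums of a list in terms of its prefix sums
theorem sum_take_drop (ws : List Int) (j k : Nat) :
    ((ws.drop j).take k).sum = (ws.take (j + k)).sum - (ws.take j).sum := by
  rw [List.take_add, List.sum_append]
  ring

theorem sum_take_succ (ws : List Int) (m : Nat) (hm : m < ws.length) :
    (ws.take (m + 1)).sum = (ws.take m).sum + ws[m] := by
  rw [List.take_succ, List.sum_append, List.getElem?_eq_getElem hm]
  simp

-- positions of a value in the prefix list (what the dict loop stores under v)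
def pvPosList (pref : List Int) (v : Int) : List Int :=
  ((PySem.List.enumerate pref 0).filter (fun p => p.2 == v)).map (fun p => p.1)

theorem pvPos_get? (pref : List Int) (v : Int) :
    ((PySem.List.enumerate pref 0).foldl (fun d p => d.modify p.2 [] (· ++ [p.1]))
        PySem.Dict.empty).get? v
      = if v ∈ pref then some (pvPosList pref v) else none := by
  have hkeys : ((PySem.List.enumerate pref 0).foldl
      (fun d p => d.modify p.2 [] (· ++ [p.1])) PySem.Dict.empty).keys
      = PySem.Set.update PySem.Dict.empty.keys ((PySem.List.enumerate pref 0).map (fun p => p.2)) :=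
    PySem.Dict.keys_foldl_modify_key (PySem.List.enumerate pref 0) (fun p => p.2) []
      (fun _ p => (· ++ [p.1])) PySem.Dict.empty
  have hmem : ∀ w : Int, ((PySem.List.enumerate pref 0).foldl
      (fun d p => d.modify p.2 [] (· ++ [p.1])) PySem.Dict.empty).contains w = true ↔ w ∈ pref := by
    intro w
    rw [PySem.Dict.contains_iff_mem_keys, hkeys, PySem.List.map_snd_enumerate]
    rw [PySem.Set.mem_update]
    simp [PySem.Dict.keys_empty]
  have hgetD : ((PySem.List.enumerate pref 0).foldl
      (fun d p => d.modify p.2 [] (· ++ [p.1])) PySem.Dict.empty).getD v [] = pvPosList pref v := by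
    have h1 : (PySem.List.enumerate pref 0).foldl
        (fun d p => d.modify p.2 [] (· ++ [p.1])) PySem.Dict.empty
        = ((PySem.List.enumerate pref 0).map (fun p => (p.2, p.1))).foldl
            (fun d q => d.modify q.1 [] (· ++ [q.2])) PySem.Dict.empty := by
      rw [List.foldl_map]
    rw [h1, PySem.Dict.getD_foldl_modify_append, List.filter_map, List.map_map]
    simp [pvPosList, Function.comp_def]
  by_cases hv : v ∈ pref
  · rw [if_pos hv]
    cases hg : ((PySem.List.enumerate pref 0).foldl
        (fun d p => d.modify p.2 [] (· ++ [p.1])) PySem.Dict.empty).get? v with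
    | none =>
      exfalso
      have hcf := (PySem.Dict.get?_eq_none_iff_contains _ v).mp hg
      rw [(hmem v).mpr hv] at hcf
      exact Bool.noConfusion hcf
    | some l =>
      have := hgetD
      rw [PySem.Dict.getD_eq_get?_getD, hg] at this
      simpa using congrArg some this
  · rw [if_neg hv]
    rw [PySem.Dict.get?_eq_none_iff_contains]
    cases hc : ((PySem.List.enumerate pref 0).foldl
        (fun d p => d.modify p.2 [] (· ++ [p.1])) PySem.Dict.empty).contains v with
    | false => rfl
    | true => exact absurd ((hmem v).mp hc) hv

theorem pvPosList_sorted (pref : List Int) (v : Int) : (pvPosList pref v).Pairwise (· < ·) := by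
  unfold pvPosList
  rw [List.pairwise_map]
  exact List.Pairwise.sublist List.filter_sublist (PySem.List.pairwise_lt_enumerate pref 0)

theorem pvPosList_mem (pref : List Int) (v j : Int) :
    j ∈ pvPosList pref v ↔ ∃ k : Nat, ∃ hk : k < pref.length, j = (k : Int) ∧ pref[k] = v := by
  unfold pvPosList
  simp only [List.mem_map, List.mem_filter, PySem.List.mem_enumerate_iff]
  constructor
  · rintro ⟨p, ⟨⟨k, hk, rfl⟩, hv⟩, rfl⟩
    simp only [beq_iff_eq] at hv
    exact ⟨k, hk, by simp, hv⟩
  · rintro ⟨k, hk, rfl, hv⟩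
    exact ⟨((0 : Int) + k, pref[k]), ⟨⟨k, hk, rfl⟩, by simp [hv]⟩, by simp⟩

-- the hand-written binary search returns the first index whose element is ≥ x
theorem pvBisect_spec (lst : List Int) (x : Int) (hp : lst.Pairwise (· < ·)) :
    ∀ (n : Nat) (lo hi : Int), 0 ≤ lo → lo ≤ hi → hi ≤ (lst.length : Int) → (hi - lo).toNat ≤ n →
    (∀ (k : Nat) (hk : k < lst.length), (k : Int) < lo → lst[k] < x) →
    (∀ (k : Nat) (hk : k < lst.length), hi ≤ (k : Int) → x ≤ lst[k]) →
    lo ≤ pvBisect lst x lo hi ∧ pvBisect lst x lo hi ≤ hi ∧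
    (∀ (k : Nat) (hk : k < lst.length), (k : Int) < pvBisect lst x lo hi → lst[k] < x) ∧
    (∀ (k : Nat) (hk : k < lst.length), pvBisect lst x lo hi ≤ (k : Int) → x ≤ lst[k]) := by
  intro n
  induction n with
  | zero =>
    intro lo hi h0 hlh hhl hn hbelow habove
    have : lo = hi := by omega
    subst this
    rw [pvBisect, dif_neg (by omega)]
    exact ⟨le_refl _, le_refl _, hbelow, habove⟩
  | succ n ih =>
    intro lo hi h0 hlh hhl hn hbelow habove
    by_cases h : lo < hi
    · have hb := PySem.Int.floordiv_two_mid_bounds (le_of_lt h)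
      have hmidhi : PySem.Int.floordiv (lo + hi) 2 < hi := by
        rw [PySem.Int.floordiv_lt_iff_lt_mul (by omega)]
        omega
      set mid := PySem.Int.floordiv (lo + hi) 2 with hmid
      have hmid0 : 0 ≤ mid := le_trans h0 hb.1
      have hmidlen : mid < (lst.length : Int) := lt_of_lt_of_le hmidhi hhl
      have hunf : pvBisect lst x lo hi
          = if (PySem.List.pyGet? lst mid).getD 0 < x then pvBisect lst x (mid + 1) hi
            else pvBisect lst x lo mid := by
        rw [pvBisect, dif_pos h]
      rw [hunf, PySem.List.pyGet?_eq_some_getElem lst hmid0 hmidlen]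
      simp only [Option.getD_some]
      have hmono := List.pairwise_iff_getElem.mp hp
      by_cases hlt : lst[mid.toNat] < x
      · rw [if_pos hlt]
        refine ?_
        have := ih (mid + 1) hi (by omega) (by omega) hhl (by omega)
          (fun k hk hklt => ?_) habove
        · exact ⟨le_trans (by omega) this.1, this.2.1, this.2.2.1, this.2.2.2⟩
        · by_cases hkm : k = mid.toNat
          · subst hkm; exact hlt
          · have : k < mid.toNat := by omega
            exact lt_trans (hmono k mid.toNat hk (by omega) this) hlt
      · rw [if_neg hlt]
        have := ih lo mid h0 hb.1 (by omega) (by omega) hbelow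
          (fun k hk hklt => ?_)
        · exact ⟨this.1, le_trans this.2.1 (by omega), this.2.2.1, this.2.2.2⟩
        · by_cases hkm : k = mid.toNat
          · subst hkm; omega
          · have : mid.toNat < k := by omega
            exact le_trans (by omega) (le_of_lt (hmono mid.toNat k (by omega) hk this))
    · rw [pvBisect, dif_neg h]
      exact ⟨le_refl _, by omega, hbelow, fun k hk hle => habove k hk (by omega)⟩

-- the main loop of B computes the greedy debt recursion
theorem pvMainLoop_eq (ws : List Int) : ∀ (fuel m : Nat), m ≤ ws.length → ws.length - m < fuel →
    pvMainLoop ws (0 :: pvSums 0 ws)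
      ((PySem.List.enumerate (0 :: pvSums 0 ws) 0).foldl
        (fun d p => d.modify p.2 [] (· ++ [p.1])) PySem.Dict.empty)
      (ws.length : Int) fuel (m : Int)
    = (if pvEat 0 (ws.drop m) then "YES" else "NO") := by
  intro fuel
  induction fuel with
  | zero => intro m hm hf; omega
  | succ fuel ih =>
    intro m hm hf
    by_cases hlt : m < ws.length
    · have hcast : ((m : Int) < (ws.length : Int)) := by exact_mod_cast hlt
      have hpget := pvPref_get ws m hm
      have hwget : PySem.List.pyGet? ws (m : Int) = some ws[m] := by
        rw [PySem.List.pyGet?_natCast, List.getElem?_eq_getElem hlt]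
      have hget := pvPos_get? (0 :: pvSums 0 ws) ((ws.take m).sum + 2 * ws[m])
      rw [pvMainLoop, if_pos hcast, hpget, hwget]
      simp only [Option.getD_some]
      rw [hget]
      -- abbreviations
      have hrestlen : (ws.drop (m + 1)).length = ws.length - (m + 1) := by simp
      have hdropm : ws.drop m = ws[m] :: ws.drop (m + 1) := List.drop_eq_getElem_cons hlt
      have heat0 : pvEat 0 (ws.drop m) = pvEat ws[m] (ws.drop (m + 1)) := by
        rw [hdropm, pvEat]; simp
      -- a block of length k starting after position m ends at a position whose prefix sum is v
      have hex : ∀ k : Nat, k ≤ (ws.drop (m + 1)).length → ((ws.drop (m + 1)).take k).sum = ws[m] →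
          m + 1 + k ≤ ws.length ∧ (ws.take (m + 1 + k)).sum = (ws.take m).sum + 2 * ws[m] := by
        intro k hk hsum
        constructor
        · omega
        · have h1 := sum_take_drop ws (m + 1) k
          have h2 := sum_take_succ ws m hlt
          rw [hsum] at h1
          omega
      -- positions with prefix sum v are exactly the members of the stored list
      have hmemlst : ∀ j : Nat, j ≤ ws.length → (ws.take j).sum = (ws.take m).sum + 2 * ws[m] →
          ((j : Int) ∈ pvPosList (0 :: pvSums 0 ws) ((ws.take m).sum + 2 * ws[m])) := by
        intro j hj hsum
        rw [pvPosList_mem]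
        exact ⟨j, by rw [pvPref_length]; omega, rfl, by rw [pvPref_getElem ws j hj]; exact hsum⟩
      have hmemlst' : ∀ x : Int, x ∈ pvPosList (0 :: pvSums 0 ws) ((ws.take m).sum + 2 * ws[m]) →
          ∃ j : Nat, j ≤ ws.length ∧ x = (j : Int) ∧ (ws.take j).sum = (ws.take m).sum + 2 * ws[m] := by
        intro x hx
        rw [pvPosList_mem] at hx
        obtain ⟨k, hk, rfl, hv⟩ := hx
        rw [pvPref_length] at hk
        refine ⟨k, by omega, rfl, ?_⟩
        rw [pvPref_getElem ws k (by omega)] at hv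
        exact hv
      by_cases hv : ((ws.take m).sum + 2 * ws[m]) ∈ (0 :: pvSums 0 ws)
      · rw [if_pos hv]
        have hsorted := pvPosList_sorted (0 :: pvSums 0 ws) ((ws.take m).sum + 2 * ws[m])
        set lst := pvPosList (0 :: pvSums 0 ws) ((ws.take m).sum + 2 * ws[m]) with hlstdef
        have hspec := pvBisect_spec lst ((m : Int) + 1) hsorted lst.length 0 (lst.length : Int)
          (le_refl 0) (by omega) (le_refl _) (by omega)
          (fun k hk hc => absurd hc (by omega))
          (fun k hk hc => absurd hc (by omega))
        obtain ⟨hr0, hrlen, hrbelow, hrabove⟩ := hspec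
        set r := pvBisect lst ((m : Int) + 1) 0 (lst.length : Int) with hrdef
        dsimp only []
        have hmono := List.pairwise_iff_getElem.mp hsorted
        by_cases hreq : r = (lst.length : Int)
        · rw [if_pos hreq]
          have hE : pvEat 0 (ws.drop m) = false := by
            rw [heat0, pvEat_firstK]
            cases hfk : pvFirstK ws[m] (ws.drop (m + 1)) with
            | none => rfl
            | some k =>
              exfalso
              obtain ⟨hk1, hk2, _⟩ := pvFirstK_some _ _ _ hfk
              obtain ⟨hj1, hj2⟩ := hex k hk1 hk2
              have hmem := hmemlst (m + 1 + k) hj1 hj2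
              obtain ⟨idx, hidx, hidxeq⟩ := List.mem_iff_getElem.mp hmem
              have := hrbelow idx hidx (by omega)
              rw [hidxeq] at this
              have : ((m : Int)) + 1 + (k : Int) < (m : Int) + 1 := by push_cast at this ⊢; omega
              omega
          rw [hE]
          simp
        · rw [if_neg hreq]
          have hrlt : r < (lst.length : Int) := lt_of_le_of_ne hrlen hreq
          have hrget : PySem.List.pyGet? lst r = some (lst[r.toNat]'(by omega)) :=
            PySem.List.pyGet?_eq_some_getElem lst hr0 hrlt
          have hrinlst : lst[r.toNat]'(by omega) ∈ lst := List.getElem_mem _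
          obtain ⟨j0, hj0le, hj0eq, hj0sum⟩ := hmemlst' _ hrinlst
          have hj0ge : m + 1 ≤ j0 := by
            have := hrabove r.toNat (by omega) (by omega)
            rw [hj0eq] at this
            exact_mod_cast this
          -- the stored block length
          have hk0sum : ((ws.drop (m + 1)).take (j0 - (m + 1))).sum = ws[m] := by
            have h1 := sum_take_drop ws (m + 1) (j0 - (m + 1))
            have h2 := sum_take_succ ws m hlt
            rw [show m + 1 + (j0 - (m + 1)) = j0 from by omega, hj0sum] at h1
            omega
          have hmin : ∀ k' < j0 - (m + 1), ((ws.drop (m + 1)).take k').sum ≠ ws[m] := by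
            intro k' hk' hc
            obtain ⟨hj1, hj2⟩ := hex k' (by omega) hc
            have hmem := hmemlst (m + 1 + k') hj1 hj2
            obtain ⟨idx, hidx, hidxeq⟩ := List.mem_iff_getElem.mp hmem
            have hlt2 : lst[idx] < lst[r.toNat]'(by omega) := by
              rw [hidxeq, hj0eq]
              push_cast
              omega
            have hidxr : idx < r.toNat := by
              by_contra hcon
              rcases Nat.lt_or_ge r.toNat idx with h' | h'
              · exact absurd (hmono r.toNat idx (by omega) hidx h') (by omega)
              · have : idx = r.toNat := by omega
                subst this
                omega
            have := hrbelow idx hidx (by omega)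
            rw [hidxeq] at this
            push_cast at this
            omega
          have hfk : pvFirstK ws[m] (ws.drop (m + 1)) = some (j0 - (m + 1)) := by
            cases hf0 : pvFirstK ws[m] (ws.drop (m + 1)) with
            | none =>
              exact absurd hk0sum (pvFirstK_none _ _ hf0 (j0 - (m + 1)) (by omega))
            | some k1 =>
              obtain ⟨hk11, hk12, hk13⟩ := pvFirstK_some _ _ _ hf0
              rcases lt_trichotomy k1 (j0 - (m + 1)) with h' | h' | h'
              · exact absurd hk12 (hmin k1 h')
              · rw [h']
              · exact absurd hk0sum (hk13 _ h')
          have hEat : pvEat 0 (ws.drop m) = pvEat 0 (ws.drop j0) := by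
            rw [heat0, pvEat_firstK, hfk]
            dsimp only []
            rw [List.drop_drop, show m + 1 + (j0 - (m + 1)) = j0 from by omega]
          rw [hrget]
          simp only [Option.getD_some]
          rw [hj0eq, ih j0 hj0le (by omega), hEat]
      · rw [if_neg hv]
        have hE : pvEat 0 (ws.drop m) = false := by
          rw [heat0, pvEat_firstK]
          cases hfk : pvFirstK ws[m] (ws.drop (m + 1)) with
          | none => rfl
          | some k =>
            exfalso
            obtain ⟨hk1, hk2, _⟩ := pvFirstK_some _ _ _ hfk
            obtain ⟨hj1, hj2⟩ := hex k hk1 hk2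
            have hmem := hmemlst (m + 1 + k) hj1 hj2
            rw [pvPosList_mem] at hmem
            obtain ⟨k', hk', _, hveq⟩ := hmem
            exact hv (hveq ▸ List.getElem_mem hk')
        rw [hE]
        simp
    · have hmn : m = ws.length := le_antisymm hm (not_lt.mp hlt)
      rw [pvMainLoop, if_neg (by exact_mod_cast hlt)]
      subst hmn
      rw [List.drop_length]
      simp [pvEat]

-- ===== VERDICT (by name: the statement is the Claim_ definition above) =====
theorem solve_spec : Claim_equal_solve := by
  intro weights _
  unfold Spec_solve solve solve_alt
  rw [PySem.List.slice?_none_none_neg_one, sorted_id_rev_eq_reverse]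
  simp only [Option.getD_some]
  set ws := (PySem.List.sorted weights (fun x => x)).reverse with hws
  rw [pvPref_eq]
  have hB := pvMainLoop_eq ws (ws.length + 1) 0 (Nat.zero_le _) (by omega)
  rw [Nat.cast_zero, List.drop_zero] at hB
  rw [show ((PySem.List.sorted weights (fun x => x)).reverse.length : Int) = (ws.length : Int) from rfl]
  rw [hB]
  have hA := pvOuterA_spec ws.length ws [] [] le_rfl rfl
  have h1 : (pvOuterA [] [] ws).1.sum = (List.foldl pvStep (0, 0) ws).1 := by
    simpa using congrArg Prod.fst hA
  have h2 : (pvOuterA [] [] ws).2.sum = (List.foldl pvStep (0, 0) ws).2 := by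
    simpa using congrArg Prod.snd hA
  have hEat : pvEat 0 ws = decide ((pvOuterA [] [] ws).1.sum = (pvOuterA [] [] ws).2.sum) := by
    rw [h1, h2]
    simpa using (pvStep_eat ws 0 0).symm
  by_cases hc : (pvOuterA [] [] ws).1.sum = (pvOuterA [] [] ws).2.sum
  · rw [if_pos hc]
    rw [if_pos (by rw [hEat]; simpa using hc)]
  · rw [if_neg hc]
    rw [if_neg (by rw [hEat]; simpa using hc)]
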